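-- pv_equiv track=rewrite | github.com/joaofred/conservacao-uri | tesser.py | extraiprimo
-- ===== SOURCE A (Python) =====
-- def extraiprimo(sequencia):
--     seqfin = ""
--     reviravolta = False
--     for i in sequencia:
--         if i != "#":
--             seqfin+=i
--             reviravolta = True
--         if reviravolta == True:
--             if i == "#": break
--     return(seqfin)
-- ===== SOURCE B (Python) =====
-- def extraiprimo(sequencia):
--     return sequencia.lstrip('#').split('#', 1)[0]
-- ===== Notes on version B (the rewrite author's own statement) =====
-- stated objective: faster
-- what changed: Replaces the character-by-character loop with its reviravolta flag and quadratic string concatenation by two linear library string operations: strip the leading marker characters, then split once on the marker and take the first piece.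
import Mathlib
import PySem

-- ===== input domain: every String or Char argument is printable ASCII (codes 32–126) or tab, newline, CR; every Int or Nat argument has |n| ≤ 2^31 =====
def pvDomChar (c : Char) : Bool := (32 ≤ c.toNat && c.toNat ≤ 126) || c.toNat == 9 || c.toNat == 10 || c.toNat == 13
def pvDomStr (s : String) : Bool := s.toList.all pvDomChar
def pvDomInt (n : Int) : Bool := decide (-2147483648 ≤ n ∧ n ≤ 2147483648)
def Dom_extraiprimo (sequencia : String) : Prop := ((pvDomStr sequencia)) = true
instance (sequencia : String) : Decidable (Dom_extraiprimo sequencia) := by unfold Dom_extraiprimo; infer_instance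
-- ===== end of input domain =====

-- B: two library string operations (lstrip('#') then split('#',1)[0]) instead of A's stateful char loop; same return value.
-- ===== PORT A =====
-- the for-loop with its break, transliterated as structural recursion over the characters;
-- state = (seqfin as a char list accumulator, reviravolta)
def extraiprimoLoop : List Char → List Char → Bool → List Char
  | [], seqfin, _ => seqfin
  | i :: rest, seqfin, reviravolta =>
    let seqfin' := if i ≠ '#' then seqfin ++ [i] else seqfin
    let reviravolta' := if i ≠ '#' then true else reviravolta
    if reviravolta' = true ∧ i = '#' then seqfin'   -- break
    else extraiprimoLoop rest seqfin' reviravolta'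

def extraiprimo (sequencia : String) : String :=
  String.mk (extraiprimoLoop sequencia.toList [] false)

-- ===== PORT B =====
-- lstrip('#') is exactly dropWhile (· = '#'); split('#', 1)[0] is exactly takeWhile (· ≠ '#')
def extraiprimo_alt (sequencia : String) : String :=
  String.mk ((sequencia.toList.dropWhile (· = '#')).takeWhile (· ≠ '#'))

-- ===== PRECONDITION & SPEC =====
def Spec_extraiprimo (sequencia : String) (out : String) : Prop := out = extraiprimo_alt sequencia
instance (sequencia : String) (out : String) : Decidable (Spec_extraiprimo sequencia out) := by unfold Spec_extraiprimo; infer_instance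

-- ===== CLAIM (what is proved, stated in full; the proofs are below) =====
def Claim_equal_extraiprimo : Prop := ∀ (sequencia : String), Dom_extraiprimo sequencia → Spec_extraiprimo sequencia (extraiprimo sequencia)

-- ===== LEMMAS AND PROOFS =====

-- ===== VERDICT (by name: the statement is the Claim_ definition above) =====
-- once reviravolta is true, the loop copies characters up to (excluding) the next '#'
theorem extraiprimoLoop_true (cs acc : List Char) :
    extraiprimoLoop cs acc true = acc ++ cs.takeWhile (· ≠ '#') := by
  induction cs generalizing acc with
  | nil => simp [extraiprimoLoop]
  | cons c rest ih =>
    by_cases h : c = '#'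
    · subst h; simp [extraiprimoLoop, List.takeWhile]
    · simp [extraiprimoLoop, h, List.takeWhile, ih]

-- while reviravolta is false the loop drops leading '#'s, then behaves as the true-phase
theorem extraiprimoLoop_false (cs acc : List Char) :
    extraiprimoLoop cs acc false = acc ++ (cs.dropWhile (· = '#')).takeWhile (· ≠ '#') := by
  induction cs generalizing acc with
  | nil => simp [extraiprimoLoop]
  | cons c rest ih =>
    by_cases h : c = '#'
    · subst h; simpa [extraiprimoLoop, List.dropWhile] using ih acc
    · simp [extraiprimoLoop, h, List.dropWhile, extraiprimoLoop_true]

theorem extraiprimo_spec : Claim_equal_extraiprimo := by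
  intro s _
  unfold Spec_extraiprimo extraiprimo extraiprimo_alt
  simp [extraiprimoLoop_false]
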